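-- pv_equiv track=rewrite | github.com/dandoug/cryptomath-book | src/helpers.py | format_ciphertext
-- ===== SOURCE A (Python) =====
-- CHARACTERS = 'abcdefghijklmnopqrstuvwxyz'
--
-- def format_ciphertext(ciphertext: str) -> str:
--     """
--     Convert ciphertext to uppercase and format into blocks of 5 characters,
--     Format into lines of 10 of such groups.
--     """
--     # just to make sure that all letters and no spaces
--     ciphertext = (''.join(c for c in ciphertext.lower() if c in CHARACTERS)).upper()
--     result = []
--
--     # Break into 5-character blocks
--     for i in range(0, len(ciphertext), 5):
--         block = ciphertext[i:i + 5]
--         result.append(block)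
--
--     # Group blocks into lines of 10 so each line is 60 chars or less
--     formatted_text = []
--     for i in range(0, len(result), 10):
--         line = ' '.join(result[i:i + 10])
--         formatted_text.append(line)
--
--     return '\n'.join(formatted_text)
-- ===== SOURCE B (Python) =====
-- CHARACTERS = 'abcdefghijklmnopqrstuvwxyz'
--
-- def format_ciphertext(ciphertext: str) -> str:
--     """Single pass: clean and uppercase, then insert a space after every 5th
--     kept character and a newline after every 50th, only when more follow."""
--     cleaned = ''.join(c for c in ciphertext.lower() if c in CHARACTERS).upper()
--     n = len(cleaned)
--     out = []
--     for p, c in enumerate(cleaned, 1):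
--         out.append(c)
--         if p < n:
--             if p % 50 == 0:
--                 out.append('\n')
--             elif p % 5 == 0:
--                 out.append(' ')
--     return ''.join(out)
-- ===== Notes on version B (the rewrite author's own statement) =====
-- stated objective: simpler
-- what changed: Replaced the two grouping passes (build 5-char blocks with slices, then join groups of 10 blocks into lines) by a single enumerate pass over the cleaned string that emits each character and inserts a newline after every 50th kept character or a space after every 5th, when more characters remain.
import Mathlib
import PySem

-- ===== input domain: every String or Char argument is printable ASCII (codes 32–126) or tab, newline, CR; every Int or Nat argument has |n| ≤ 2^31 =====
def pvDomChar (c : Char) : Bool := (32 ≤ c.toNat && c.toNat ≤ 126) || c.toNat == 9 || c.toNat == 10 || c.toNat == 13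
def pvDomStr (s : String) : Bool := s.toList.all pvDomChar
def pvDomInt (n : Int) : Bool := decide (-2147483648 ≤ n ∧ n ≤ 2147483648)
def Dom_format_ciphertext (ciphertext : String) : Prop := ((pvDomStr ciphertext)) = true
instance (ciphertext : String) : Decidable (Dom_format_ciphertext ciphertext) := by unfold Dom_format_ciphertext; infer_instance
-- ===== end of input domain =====

-- B replaces A's two grouping passes (5-char blocks, then lines of 10 blocks) by a single
-- enumerate pass that inserts '\n' after every 50th kept character and ' ' after every 5th,
-- when more characters follow; same output, same cost (objective: simpler).

def pvCHARACTERS : String := "abcdefghijklmnopqrstuvwxyz"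

-- ===== PORT A =====
-- 'c in CHARACTERS' for a single character c is membership among the string's characters (exact here);
-- ''.join of the kept characters is String.ofList of the filtered char list.
def format_ciphertext (ciphertext : String) : String :=
  let cleaned := PySem.Str.upper (String.ofList
      ((PySem.Str.lower ciphertext).toList.filter (fun c => pvCHARACTERS.toList.contains c)))
  let result := (PySem.List.pyRange 0 (PySem.Str.len cleaned) 5).foldl
      (fun acc i => acc ++ [PySem.Str.slice cleaned (some i) (some (i + 5))]) []
  let formatted_text := (PySem.List.pyRange 0 ((result.length : Int)) 10).foldl
      (fun acc i => acc ++ [PySem.Str.join " " (PySem.List.slice result (some i) (some (i + 10)))]) []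
  PySem.Str.join "\n" formatted_text

-- ===== PORT B =====
def format_ciphertext_alt (ciphertext : String) : String :=
  let cleaned := PySem.Str.upper (String.ofList
      ((PySem.Str.lower ciphertext).toList.filter (fun c => pvCHARACTERS.toList.contains c)))
  let n := PySem.Str.len cleaned
  let out := (PySem.List.enumerate cleaned.toList 1).foldl
      (fun acc pc =>
        let acc' := acc ++ [pc.2]
        if pc.1 < n then
          if PySem.Int.mod pc.1 50 = 0 then acc' ++ ['\n']
          else if PySem.Int.mod pc.1 5 = 0 then acc' ++ [' ']
          else acc'
        else acc') []
  String.ofList out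

-- ===== PRECONDITION & SPEC =====
def Spec_format_ciphertext (ciphertext : String) (out : String) : Prop := out = format_ciphertext_alt ciphertext
instance (ciphertext : String) (out : String) : Decidable (Spec_format_ciphertext ciphertext out) := by unfold Spec_format_ciphertext; infer_instance

-- ===== CLAIM (what is proved, stated in full; the proofs are below) =====
def Claim_equal_format_ciphertext : Prop := ∀ (ciphertext : String), Dom_format_ciphertext ciphertext → Spec_format_ciphertext ciphertext (format_ciphertext ciphertext)

-- ===== LEMMAS AND PROOFS =====

-- separator B emits after (1-indexed) position p, when more characters follow
def pvSep (p : Nat) : List Char := if p % 50 = 0 then ['\n'] else if p % 5 = 0 then [' '] else []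

-- B's loop body as a structural recursion: char, then separator unless it is the last char
def pvEmit : List Char → Nat → List Char
  | [], _ => []
  | c :: rest, p => c :: ((if rest.isEmpty then [] else pvSep p) ++ pvEmit rest (p + 1))

-- like pvEmit but a separator after EVERY char (what B does on a proper prefix)
def pvEmitAll : List Char → Nat → List Char
  | [], _ => []
  | c :: rest, p => c :: (pvSep p ++ pvEmitAll rest (p + 1))

def pvChunk5 {α : Type} : List α → List (List α)
  | [] => []
  | x :: rest => ((x :: rest).take 5) :: pvChunk5 ((x :: rest).drop 5)
termination_by l => l.length
decreasing_by simp

def pvChunk10 {α : Type} : List α → List (List α)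
  | [] => []
  | x :: rest => ((x :: rest).take 10) :: pvChunk10 ((x :: rest).drop 10)
termination_by l => l.length
decreasing_by simp

theorem pvSep_nil {p : Nat} (h : p % 5 ≠ 0) : pvSep p = [] := by
  unfold pvSep
  rw [if_neg (by omega), if_neg h]

theorem pvSep_space {p : Nat} (h5 : p % 5 = 0) (h50 : p % 50 ≠ 0) : pvSep p = [' '] := by
  unfold pvSep
  simp [h5, h50]

theorem pvSep_nl {p : Nat} (h : p % 50 = 0) : pvSep p = ['\n'] := by
  unfold pvSep
  simp [h]

theorem pvSep_add50 (p : Nat) : pvSep (p + 50) = pvSep p := by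
  unfold pvSep
  have h1 : (p + 50) % 50 = p % 50 := by omega
  have h2 : (p + 50) % 5 = p % 5 := by omega
  rw [h1, h2]

theorem pvEmit_cons (c : Char) (rest : List Char) (p : Nat) :
    pvEmit (c :: rest) p = c :: ((if rest.isEmpty then [] else pvSep p) ++ pvEmit rest (p + 1)) := rfl

theorem pvEmitAll_cons (c : Char) (rest : List Char) (p : Nat) :
    pvEmitAll (c :: rest) p = c :: (pvSep p ++ pvEmitAll rest (p + 1)) := rfl

theorem pvEmit_shift : ∀ (cs : List Char) (p : Nat), pvEmit cs (p + 50) = pvEmit cs p := by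
  intro cs
  induction cs with
  | nil => intro p; rfl
  | cons c rest ih =>
    intro p
    rw [pvEmit_cons, pvEmit_cons, pvSep_add50]
    have h : p + 50 + 1 = (p + 1) + 50 := by omega
    rw [h, ih]

theorem pvEmit_append : ∀ (xs ys : List Char) (p : Nat), ys ≠ [] →
    pvEmit (xs ++ ys) p = pvEmitAll xs p ++ pvEmit ys (p + xs.length) := by
  intro xs
  induction xs with
  | nil => intro ys p _; simp [pvEmitAll]
  | cons c rest ih =>
    intro ys p hys
    have hne : ¬ ((rest ++ ys).isEmpty = true) := by
      simp only [List.isEmpty_iff, List.append_eq_nil_iff]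
      rintro ⟨-, h⟩; exact hys h
    rw [List.cons_append, pvEmit_cons, if_neg hne, ih ys (p + 1) hys, pvEmitAll_cons]
    have h : p + 1 + rest.length = p + (c :: rest).length := by simp; omega
    rw [h]
    simp [List.append_assoc]

theorem pvEmitAll_append : ∀ (xs ys : List Char) (p : Nat),
    pvEmitAll (xs ++ ys) p = pvEmitAll xs p ++ pvEmitAll ys (p + xs.length) := by
  intro xs
  induction xs with
  | nil => intro ys p; simp [pvEmitAll]
  | cons c rest ih =>
    intro ys p
    rw [List.cons_append, pvEmitAll_cons, ih ys (p + 1), pvEmitAll_cons]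
    have h : p + 1 + rest.length = p + (c :: rest).length := by simp; omega
    rw [h]
    simp [List.append_assoc]

theorem pvEmit_nosep : ∀ (cs : List Char) (p : Nat),
    (∀ k, k + 1 < cs.length → pvSep (p + k) = []) → pvEmit cs p = cs := by
  intro cs
  induction cs with
  | nil => intro p _; rfl
  | cons c rest ih =>
    intro p h
    cases rest with
    | nil => simp [pvEmit]
    | cons d rest' =>
      have hsep : pvSep p = [] := by simpa using h 0 (by simp)
      have ih' : pvEmit (d :: rest') (p + 1) = d :: rest' := by
        apply ih
        intro k hk
        have hh := h (k + 1) (by simp at hk ⊢; omega)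
        have he : p + (k + 1) = p + 1 + k := by omega
        rwa [he] at hh
      rw [pvEmit_cons, if_neg (by simp), hsep, List.nil_append, ih']

theorem pvEmitAll_run : ∀ (cs : List Char) (p : Nat), cs ≠ [] →
    (∀ k, k + 1 < cs.length → pvSep (p + k) = []) →
    pvEmitAll cs p = cs ++ pvSep (p + cs.length - 1) := by
  intro cs
  induction cs with
  | nil => intro p h _; exact absurd rfl h
  | cons c rest ih =>
    intro p _ h
    cases rest with
    | nil => simp [pvEmitAll]
    | cons d rest' =>
      have hsep : pvSep p = [] := by simpa using h 0 (by simp)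
      have ih' : pvEmitAll (d :: rest') (p + 1) = (d :: rest') ++ pvSep (p + 1 + (d :: rest').length - 1) := by
        apply ih _ (by simp)
        intro k hk
        have hh := h (k + 1) (by simp at hk ⊢; omega)
        have he : p + (k + 1) = p + 1 + k := by omega
        rwa [he] at hh
      rw [pvEmitAll_cons, hsep, List.nil_append, ih']
      have he : p + 1 + (d :: rest').length - 1 = p + (c :: d :: rest').length - 1 := by simp; omega
      rw [he]
      simp

theorem pvChunk5_nil {α : Type} : pvChunk5 ([] : List α) = [] := by
  unfold pvChunk5
  rfl

theorem pvChunk10_nil {α : Type} : pvChunk10 ([] : List α) = [] := by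
  unfold pvChunk10
  rfl

theorem pvChunk5_eq {α : Type} (cs : List α) (h : cs ≠ []) :
    pvChunk5 cs = cs.take 5 :: pvChunk5 (cs.drop 5) := by
  cases cs with
  | nil => exact absurd rfl h
  | cons x rest => rw [pvChunk5.eq_def]

theorem pvChunk10_eq {α : Type} (cs : List α) (h : cs ≠ []) :
    pvChunk10 cs = cs.take 10 :: pvChunk10 (cs.drop 10) := by
  cases cs with
  | nil => exact absurd rfl h
  | cons x rest => rw [pvChunk10.eq_def]

theorem pvChunk5_short {α : Type} (cs : List α) (h : cs ≠ []) (hl : cs.length ≤ 5) :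
    pvChunk5 cs = [cs] := by
  rw [pvChunk5_eq cs h, List.take_of_length_le hl, List.drop_of_length_le hl, pvChunk5_nil]

theorem pvChunk10_short {α : Type} (cs : List α) (h : cs ≠ []) (hl : cs.length ≤ 10) :
    pvChunk10 cs = [cs] := by
  rw [pvChunk10_eq cs h, List.take_of_length_le hl, List.drop_of_length_le hl, pvChunk10_nil]

theorem pvChunk5_ne_nil {α : Type} (cs : List α) (h : cs ≠ []) : pvChunk5 cs ≠ [] := by
  rw [pvChunk5_eq cs h]; simp

theorem pvChunk10_cons {α : Type} (xs ys : List α) (h : xs.length = 10) :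
    pvChunk10 (xs ++ ys) = xs :: pvChunk10 ys := by
  have hne : xs ++ ys ≠ [] := by
    intro hc
    have := (List.append_eq_nil_iff.mp hc).1
    subst this; simp at h
  rw [pvChunk10_eq _ hne, List.take_append_of_le_length (by omega),
      List.drop_append_of_le_length (by omega), List.take_of_length_le (by omega),
      List.drop_of_length_le (by omega)]
  simp

theorem pvChunk5_append : ∀ (n : Nat) (xs ys : List Char), xs.length ≤ n → xs.length % 5 = 0 →
    pvChunk5 (xs ++ ys) = pvChunk5 xs ++ pvChunk5 ys := by
  intro n
  induction n with
  | zero =>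
    intro xs ys hn _
    have : xs = [] := List.eq_nil_of_length_eq_zero (by omega)
    subst this; simp [pvChunk5_nil]
  | succ n ih =>
    intro xs ys hn h5
    by_cases hxs : xs = []
    · subst hxs; simp [pvChunk5]
    · have hlen : 5 ≤ xs.length := by
        have : xs.length ≠ 0 := by simpa using hxs
        omega
      have hne : xs ++ ys ≠ [] := by
        intro hc; exact hxs (List.append_eq_nil_iff.mp hc).1
      rw [pvChunk5_eq _ hne, pvChunk5_eq _ hxs,
          List.take_append_of_le_length (by omega),
          List.drop_append_of_le_length (by omega)]
      rw [ih (xs.drop 5) ys (by simp; omega) (by simp; omega)]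
      simp

theorem pvRangeChunk5 : ∀ (n : Nat) (cs : List Char), cs.length ≤ n →
    (List.range ((cs.length + 4) / 5)).map (fun k => (cs.drop (5 * k)).take 5) = pvChunk5 cs := by
  intro n
  induction n with
  | zero =>
    intro cs hn
    have : cs = [] := List.eq_nil_of_length_eq_zero (by omega)
    subst this; simp [pvChunk5_nil]
  | succ n ih =>
    intro cs hn
    by_cases hcs : cs = []
    · subst hcs; simp [pvChunk5_nil]
    · have hpos : 1 ≤ cs.length := by
        have : cs.length ≠ 0 := by simpa using hcs
        omega
      have hm : (cs.length + 4) / 5 = ((cs.drop 5).length + 4) / 5 + 1 := by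
        simp only [List.length_drop]; omega
      rw [hm, List.range_succ_eq_map, List.map_cons, List.map_map]
      rw [pvChunk5_eq cs hcs]
      refine congrArg₂ List.cons (by simp) ?_
      · have ihd := ih (cs.drop 5) (by simp; omega)
        rw [List.length_drop] at ihd
        rw [← ihd, List.length_drop]
        apply List.map_congr_left
        intro k _
        simp only [Function.comp_apply, Nat.succ_eq_add_one, List.drop_drop]
        have h1 : 5 * (k + 1) = 5 * k + 5 := by ring
        rw [h1, Nat.add_comm 5 (5 * k)]

theorem pvRangeChunk10 : ∀ (n : Nat) (cs : List (List Char)), cs.length ≤ n →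
    (List.range ((cs.length + 9) / 10)).map (fun k => (cs.drop (10 * k)).take 10) = pvChunk10 cs := by
  intro n
  induction n with
  | zero =>
    intro cs hn
    have : cs = [] := List.eq_nil_of_length_eq_zero (by omega)
    subst this; simp [pvChunk10_nil]
  | succ n ih =>
    intro cs hn
    by_cases hcs : cs = []
    · subst hcs; simp [pvChunk10_nil]
    · have hpos : 1 ≤ cs.length := by
        have : cs.length ≠ 0 := by simpa using hcs
        omega
      have hm : (cs.length + 9) / 10 = ((cs.drop 10).length + 9) / 10 + 1 := by
        simp only [List.length_drop]; omega
      rw [hm, List.range_succ_eq_map, List.map_cons, List.map_map]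
      rw [pvChunk10_eq cs hcs]
      refine congrArg₂ List.cons (by simp) ?_
      · have ihd := ih (cs.drop 10) (by simp; omega)
        rw [List.length_drop] at ihd
        rw [← ihd, List.length_drop]
        apply List.map_congr_left
        intro k _
        simp only [Function.comp_apply, Nat.succ_eq_add_one, List.drop_drop]
        have h1 : 10 * (k + 1) = 10 * k + 10 := by ring
        rw [h1, Nat.add_comm 10 (10 * k)]

theorem length_pvChunk5 (cs : List Char) : (pvChunk5 cs).length = (cs.length + 4) / 5 := by
  rw [← pvRangeChunk5 cs.length cs le_rfl]
  simp

-- one line of at most 50 characters (no newline inside): B's pass = ' '-join of the 5-blocks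
theorem pvLine : ∀ (n : Nat) (cs : List Char) (p : Nat), cs.length ≤ n → p % 5 = 1 →
    p + cs.length ≤ 51 → pvEmit cs p = PySem.Chars.join [' '] (pvChunk5 cs) := by
  intro n
  induction n with
  | zero =>
    intro cs p hn _ _
    have : cs = [] := List.eq_nil_of_length_eq_zero (by omega)
    subst this; simp [pvEmit, pvChunk5_nil, PySem.Chars.join_nil]
  | succ n ih =>
    intro cs p hn hp hle
    by_cases hcs : cs = []
    · subst hcs; simp [pvEmit, pvChunk5_nil, PySem.Chars.join_nil]
    · by_cases hshort : cs.length ≤ 5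
      · rw [pvChunk5_short cs hcs hshort, PySem.Chars.join_singleton]
        apply pvEmit_nosep
        intro k hk
        apply pvSep_nil
        omega
      · have hlen : 5 < cs.length := by omega
        have hsplit : cs.take 5 ++ cs.drop 5 = cs := List.take_append_drop 5 cs
        have hta : (cs.take 5).length = 5 := by simp; omega
        have hdne : cs.drop 5 ≠ [] :=
          List.ne_nil_of_length_pos (by rw [List.length_drop]; omega)
        conv_lhs => rw [← hsplit]
        rw [pvEmit_append _ _ p hdne, hta]
        have hrun : pvEmitAll (cs.take 5) p = cs.take 5 ++ [' '] := by
          rw [pvEmitAll_run (cs.take 5) p (List.ne_nil_of_length_pos (by rw [hta]; norm_num))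
              (by intro k hk; apply pvSep_nil; rw [hta] at hk; omega)]
          rw [hta]
          congr 1
          exact pvSep_space (by omega) (by omega)
        rw [hrun]
        rw [ih (cs.drop 5) (p + 5) (by simp; omega) (by omega) (by simp; omega)]
        rw [pvChunk5_eq cs hcs]
        obtain ⟨y, ys, hys⟩ := List.exists_cons_of_ne_nil (pvChunk5_ne_nil _ hdne)
        rw [hys, PySem.Chars.join_cons_cons]

-- a full 50-char line followed by its newline, positions p ≡ 1 (mod 50)
theorem pvLineNLaux : ∀ (n : Nat) (cs : List Char) (p : Nat), cs.length ≤ n → cs ≠ [] →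
    cs.length % 5 = 0 → cs.length ≤ 50 → p % 5 = 1 → (p + cs.length - 1) % 50 = 0 →
    pvEmitAll cs p = PySem.Chars.join [' '] (pvChunk5 cs) ++ ['\n'] := by
  intro n
  induction n with
  | zero =>
    intro cs p hn hne _ _ _ _
    exact absurd (List.eq_nil_of_length_eq_zero (by omega)) hne
  | succ n ih =>
    intro cs p hn hne h5 h50 hp hlast
    by_cases hshort : cs.length ≤ 5
    · have hl5 : cs.length = 5 := by
        have : cs.length ≠ 0 := by simpa using hne
        omega
      rw [pvChunk5_short cs hne hshort, PySem.Chars.join_singleton]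
      rw [pvEmitAll_run cs p hne (by intro k hk; apply pvSep_nil; omega)]
      congr 1
      apply pvSep_nl
      omega
    · have hlen : 5 < cs.length := by omega
      have hsplit : cs.take 5 ++ cs.drop 5 = cs := List.take_append_drop 5 cs
      have hta : (cs.take 5).length = 5 := by simp; omega
      have hdne : cs.drop 5 ≠ [] :=
        List.ne_nil_of_length_pos (by rw [List.length_drop]; omega)
      conv_lhs => rw [← hsplit]
      rw [pvEmitAll_append, hta]
      have hrun : pvEmitAll (cs.take 5) p = cs.take 5 ++ [' '] := by
        rw [pvEmitAll_run (cs.take 5) p (List.ne_nil_of_length_pos (by rw [hta]; norm_num))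
            (by intro k hk; apply pvSep_nil; rw [hta] at hk; omega)]
        rw [hta]
        congr 1
        apply pvSep_space (by omega)
        -- p+4 is strictly between two consecutive multiples of 50
        omega
      rw [hrun]
      rw [ih (cs.drop 5) (p + 5) (by simp; omega) hdne (by simp; omega) (by simp; omega)
          (by omega) (by simp; omega)]
      rw [pvChunk5_eq cs hne]
      obtain ⟨y, ys, hys⟩ := List.exists_cons_of_ne_nil (pvChunk5_ne_nil _ hdne)
      rw [hys, PySem.Chars.join_cons_cons]
      simp [List.append_assoc]

-- the main characterisation: B's single pass = A's blocks-then-lines structure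
theorem pvMain : ∀ (n : Nat) (cs : List Char), cs.length ≤ n →
    pvEmit cs 1 =
      PySem.Chars.join ['\n'] ((pvChunk10 (pvChunk5 cs)).map (PySem.Chars.join [' '])) := by
  intro n
  induction n with
  | zero =>
    intro cs hn
    have : cs = [] := List.eq_nil_of_length_eq_zero (by omega)
    subst this; simp [pvEmit, pvChunk5_nil, pvChunk10_nil, PySem.Chars.join_nil]
  | succ n ih =>
    intro cs hn
    by_cases hcs : cs = []
    · subst hcs; simp [pvEmit, pvChunk5_nil, pvChunk10_nil, PySem.Chars.join_nil]
    · by_cases hshort : cs.length ≤ 50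
      · have hck : (pvChunk5 cs).length ≤ 10 := by rw [length_pvChunk5]; omega
        rw [pvChunk10_short _ (pvChunk5_ne_nil cs hcs) hck, List.map_singleton,
            PySem.Chars.join_singleton]
        exact pvLine cs.length cs 1 le_rfl (by omega) (by omega)
      · have hlen : 50 < cs.length := by omega
        have hsplit : cs.take 50 ++ cs.drop 50 = cs := List.take_append_drop 50 cs
        have hta : (cs.take 50).length = 50 := by simp; omega
        have htne : cs.take 50 ≠ [] :=
          List.ne_nil_of_length_pos (by rw [hta]; norm_num)
        have hdne : cs.drop 50 ≠ [] :=
          List.ne_nil_of_length_pos (by rw [List.length_drop]; omega)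
        conv_lhs => rw [← hsplit]
        rw [pvEmit_append _ _ 1 hdne, hta]
        have h51 : pvEmit (cs.drop 50) (1 + 50) = pvEmit (cs.drop 50) 1 := pvEmit_shift _ 1
        rw [h51, ih (cs.drop 50) (by simp; omega)]
        rw [pvLineNLaux 50 (cs.take 50) 1 (by omega) htne (by omega) (by omega) (by omega) (by omega)]
        -- A side
        conv_rhs => rw [← hsplit]
        rw [pvChunk5_append cs.length (cs.take 50) (cs.drop 50) (by omega) (by omega)]
        have hc10 : (pvChunk5 (cs.take 50)).length = 10 := by rw [length_pvChunk5, hta]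
        rw [pvChunk10_cons _ _ hc10, List.map_cons]
        obtain ⟨y, ys, hys⟩ :=
          List.exists_cons_of_ne_nil (pvChunk5_ne_nil _ hdne)
        have h10ne : pvChunk10 (pvChunk5 (cs.drop 50)) ≠ [] := by
          rw [hys, pvChunk10_eq _ (by simp)]; simp
        obtain ⟨z, zs, hzs⟩ := List.exists_cons_of_ne_nil h10ne
        rw [hzs, List.map_cons, PySem.Chars.join_cons_cons, ← List.map_cons, ← hzs]

-- bridge for B's fold over enumerate
theorem pvBridgeB : ∀ (cs : List Char) (q : Nat) (acc : List Char) (N : Int),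
    (q : Int) + cs.length = N + 1 →
    (PySem.List.enumerate cs (q : Int)).foldl
      (fun acc pc =>
        let acc' := acc ++ [pc.2]
        if pc.1 < N then
          if PySem.Int.mod pc.1 50 = 0 then acc' ++ ['\n']
          else if PySem.Int.mod pc.1 5 = 0 then acc' ++ [' ']
          else acc'
        else acc') acc = acc ++ pvEmit cs q := by
  intro cs
  induction cs with
  | nil => intro q acc N _; simp [PySem.List.enumerate, pvEmit]
  | cons c rest ih =>
    intro q acc N hN
    rw [PySem.List.enumerate_cons, List.foldl_cons]
    have hmod50 : PySem.Int.mod (q : Int) 50 = ((q % 50 : Nat) : Int) := by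
      simp [PySem.Int.mod, Int.fmod_eq_emod]
    have hmod5 : PySem.Int.mod (q : Int) 5 = ((q % 5 : Nat) : Int) := by
      simp [PySem.Int.mod, Int.fmod_eq_emod]
    have hstep :
        (let acc' := acc ++ [c]
         if (q : Int) < N then
           if PySem.Int.mod (q : Int) 50 = 0 then acc' ++ ['\n']
           else if PySem.Int.mod (q : Int) 5 = 0 then acc' ++ [' ']
           else acc'
         else acc') = acc ++ [c] ++ (if rest.isEmpty then [] else pvSep q) := by
      cases rest with
      | nil =>
        have : ¬((q : Int) < N) := by simp at hN; omega
        simp [this]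
      | cons d rest' =>
        have hlt : (q : Int) < N := by simp at hN; omega
        have e50 : (PySem.Int.mod (q : Int) 50 = 0) ↔ q % 50 = 0 := by
          rw [hmod50]; exact Int.natCast_eq_zero
        have e5 : (PySem.Int.mod (q : Int) 5 = 0) ↔ q % 5 = 0 := by
          rw [hmod5]; exact Int.natCast_eq_zero
        simp only [if_pos hlt, List.isEmpty_cons]
        unfold pvSep
        by_cases h50 : q % 50 = 0
        · rw [if_pos (e50.mpr h50), if_pos h50]
          simp
        · by_cases h5 : q % 5 = 0
          · rw [if_neg (fun hh => h50 (e50.mp hh)), if_pos (e5.mpr h5), if_neg h50, if_pos h5]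
            simp
          · rw [if_neg (fun hh => h50 (e50.mp hh)), if_neg (fun hh => h5 (e5.mp hh)), if_neg h50, if_neg h5]
            simp
    rw [hstep]
    have hcast : (q : Int) + 1 = ((q + 1 : Nat) : Int) := by push_cast; ring
    rw [hcast, ih (q + 1) _ N (by push_cast at hN ⊢; simp at hN; omega)]
    simp only [pvEmit]
    simp [List.append_assoc]

-- map commutes with a nonneg-bound slice
theorem pvSliceMap {α β : Type} (f : α → β) (xs : List α) (j n : Nat) :
    PySem.List.slice (xs.map f) (some (j : Int)) (some ((j : Int) + (n : Int))) =
      (PySem.List.slice xs (some (j : Int)) (some ((j : Int) + (n : Int)))).map f := by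
  rw [PySem.List.slice_natCast_add, PySem.List.slice_natCast_add]
  simp

-- ===== VERDICT (by name: the statement is the Claim_ definition above) =====
theorem format_ciphertext_spec : Claim_equal_format_ciphertext := by
  intro ct _
  unfold Spec_format_ciphertext
  simp only [format_ciphertext, format_ciphertext_alt]
  apply String.toList_inj.mp
  generalize (PySem.Str.upper (String.ofList
      ((PySem.Str.lower ct).toList.filter (fun c => pvCHARACTERS.toList.contains c)))) = E
  -- B side
  have hB := pvBridgeB E.toList 1 [] (PySem.Str.len E)
      (by rw [PySem.Str.len_eq]; push_cast; ring)
  simp only [Nat.cast_one, List.nil_append] at hB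
  rw [String.toList_ofList, hB]
  -- A side: first fold = the 5-char blocks
  set R := (PySem.List.pyRange 0 (PySem.Str.len E) 5).foldl
      (fun acc i => acc ++ [PySem.Str.slice E (some i) (some (i + 5))]) [] with hRdef
  have hRl : R.map String.toList = pvChunk5 E.toList := by
    rw [hRdef, PySem.List.foldl_append_singleton_eq_map, List.nil_append, List.map_map]
    rw [PySem.Str.len_eq, PySem.List.pyRange_of_pos 0 _ (s := 5) (by norm_num), List.map_map]
    have hm : (if (0:Int) < ((E.toList.length : Nat) : Int)
        then ((((E.toList.length : Nat) : Int) - 0 + 5 - 1) / 5).toNat else 0)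
        = (E.toList.length + 4) / 5 := by split <;> omega
    rw [hm, ← pvRangeChunk5 E.toList.length E.toList le_rfl]
    apply List.map_congr_left
    intro k _
    simp only [Function.comp_apply]
    have e1 : (0:Int) + 5 * (k : Int) = ((5 * k : Nat) : Int) := by push_cast; ring
    have e2 : ((5 * k : Nat) : Int) + (5 : Int) = ((5 * k : Nat) : Int) + ((5 : Nat) : Int) := by
      norm_cast
    rw [PySem.Str.toList_slice, e1, e2]
    simp only [PySem.Chars.slice]
    rw [PySem.List.slice_natCast_add]
  have hRlen : R.length = (pvChunk5 E.toList).length := by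
    rw [← hRl, List.length_map]
  -- second fold = the lines of 10 blocks
  rw [PySem.List.foldl_append_singleton_eq_map, List.nil_append, PySem.Str.toList_join,
      List.map_map]
  have hnl : ("\n" : String).toList = ['\n'] := rfl
  rw [hnl]
  rw [PySem.List.pyRange_of_pos 0 _ (s := 10) (by norm_num), List.map_map]
  have hm2 : (if (0:Int) < ((R.length : Nat) : Int)
      then ((((R.length : Nat) : Int) - 0 + 10 - 1) / 10).toNat else 0)
      = ((pvChunk5 E.toList).length + 9) / 10 := by
    rw [hRlen]; split <;> omega
  rw [hm2]
  have hF : (List.range (((pvChunk5 E.toList).length + 9) / 10)).map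
      ((String.toList ∘ fun i => PySem.Str.join " " (PySem.List.slice R (some i) (some (i + 10)))) ∘
        (fun k : Nat => (0 : Int) + 10 * (k : Int)))
      = (pvChunk10 (pvChunk5 E.toList)).map (PySem.Chars.join [' ']) := by
    rw [← pvRangeChunk10 (pvChunk5 E.toList).length (pvChunk5 E.toList) le_rfl, List.map_map]
    apply List.map_congr_left
    intro k _
    simp only [Function.comp_apply]
    have e1 : (0:Int) + 10 * (k : Int) = ((10 * k : Nat) : Int) := by push_cast; ring
    have e2 : ((10 * k : Nat) : Int) + (10 : Int) = ((10 * k : Nat) : Int) + ((10 : Nat) : Int) := by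
      norm_cast
    rw [e1, e2, PySem.Str.toList_join]
    have hsp : (" " : String).toList = [' '] := rfl
    rw [hsp]
    congr 1
    rw [← pvSliceMap String.toList R (10 * k) 10, hRl, PySem.List.slice_natCast_add]
  rw [hF]
  exact (pvMain E.toList.length E.toList le_rfl).symm
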